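-- pv_equiv track=rewrite | github.com/goztokelifdeniz/Assignment-4-Python | blind_valley.py | it_fits_the_constraints
-- ===== SOURCE A (Python) =====
-- def it_fits_the_constraints(game_list, row_num, col_num, list_of_const):
--     highs_in_rows_list = []
--     bases_in_rows_list = []
--     highs_in_columns_list = []
--     bases_in_columns_list = []
--
--     for outer_index in range(0, row_num * col_num, col_num):
--         number_of_highs = 0
--         number_of_bases = 0
--         for inner_index in range(col_num):
--             if game_list[outer_index + inner_index][1] == "H":
--                 number_of_highs += 1
--             if game_list[outer_index + inner_index][1] == "B":
--                 number_of_bases += 1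
--         highs_in_rows_list.append(number_of_highs)
--         bases_in_rows_list.append(number_of_bases)
--
--     for outer_index in range(col_num):
--         number_of_highs = 0
--         number_of_bases = 0
--         for inner_index in range(0, row_num * col_num, col_num):
--             if game_list[outer_index + inner_index][1] == "H":
--                 number_of_highs += 1
--             if game_list[outer_index + inner_index][1] == "B":
--                 number_of_bases += 1
--         highs_in_columns_list.append(number_of_highs)
--         bases_in_columns_list.append(number_of_bases)
--
--     current_template_const = [highs_in_rows_list, bases_in_rows_list, highs_in_columns_list, bases_in_columns_list]
--
--     for sub_lists in range(len(list_of_const)):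
--         for const in range(len(list_of_const[sub_lists])):
--             if (list_of_const[sub_lists][const] != (-1)
--                     and list_of_const[sub_lists][const] != current_template_const[sub_lists][const]):
--                 return False
--     return True
-- ===== SOURCE B (Python) =====
-- def it_fits_the_constraints(game_list, row_num, col_num, list_of_const):
--     # Demand-driven check: no count tables are built; each non -1 constraint
--     # triggers a count of just the row/column it talks about, with early exit.
--     def line_count(start, step, length, marker):
--         count = 0
--         for k in range(length):
--             if game_list[start + k * step][1] == marker:
--                 count += 1
--         return count
--
--     for i in range(len(list_of_const)):
--         for j in range(len(list_of_const[i])):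
--             value = list_of_const[i][j]
--             if value == -1:
--                 continue
--             if i < 2:
--                 actual = line_count(j * col_num, 1, col_num, "H" if i == 0 else "B")
--             else:
--                 actual = line_count(j, col_num, row_num, "H" if i == 2 else "B")
--             if value != actual:
--                 return False
--     return True
-- ===== Notes on version B (the rewrite author's own statement) =====
-- stated objective: alternative
-- what changed: B builds no count tables: instead of A's two grid passes materialising four row/column high/base count lists and then checking them, B walks the constraint lists directly and, for each non -1 entry, counts just the one row or column that entry constrains (same check order and early exit).
import Mathlib
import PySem

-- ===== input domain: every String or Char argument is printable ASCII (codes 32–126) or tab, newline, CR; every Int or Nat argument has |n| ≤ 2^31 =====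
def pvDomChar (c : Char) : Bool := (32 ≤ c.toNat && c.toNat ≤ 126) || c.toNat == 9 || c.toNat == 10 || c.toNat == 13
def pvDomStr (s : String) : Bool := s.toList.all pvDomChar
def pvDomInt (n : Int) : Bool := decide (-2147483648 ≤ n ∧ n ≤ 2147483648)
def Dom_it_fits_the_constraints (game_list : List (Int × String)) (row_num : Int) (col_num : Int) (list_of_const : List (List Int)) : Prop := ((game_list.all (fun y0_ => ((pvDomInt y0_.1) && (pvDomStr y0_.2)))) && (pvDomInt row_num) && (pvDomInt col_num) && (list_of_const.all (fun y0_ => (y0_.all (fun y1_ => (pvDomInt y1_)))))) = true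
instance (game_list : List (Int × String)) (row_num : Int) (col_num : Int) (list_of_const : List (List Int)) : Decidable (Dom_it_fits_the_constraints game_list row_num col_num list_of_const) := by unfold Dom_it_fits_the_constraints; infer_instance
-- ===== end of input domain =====

-- B replaces A's four materialised count tables by a demand-driven check: each non -1
-- constraint counts just the one row/column it talks about, with the same check order and
-- early exit (objective: alternative decomposition).

-- ===== PORT A =====
-- game_list[k][1] (shared trivial cell accessor; Pre_ keeps every access in range)
def pvCell (gl : List (Int × String)) (k : Int) : String :=
  (PySem.List.pyGetD gl k ((0 : Int), "")).2

-- A's first loop: append per-row (highs, bases) counts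
def aRows (gl : List (Int × String)) (n m : Int) : List Int × List Int :=
  (PySem.List.pyRange 0 (n * m) m).foldl
    (fun acc outer =>
      let c := (PySem.List.pyRange 0 m 1).foldl
        (fun c inner =>
          let c := if pvCell gl (outer + inner) = "H" then (c.1 + 1, c.2) else c
          if pvCell gl (outer + inner) = "B" then (c.1, c.2 + 1) else c)
        ((0 : Int), (0 : Int))
      (acc.1 ++ [c.1], acc.2 ++ [c.2]))
    ([], [])

-- A's second loop: append per-column (highs, bases) counts
def aCols (gl : List (Int × String)) (n m : Int) : List Int × List Int :=
  (PySem.List.pyRange 0 m 1).foldl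
    (fun acc outer =>
      let c := (PySem.List.pyRange 0 (n * m) m).foldl
        (fun c inner =>
          let c := if pvCell gl (outer + inner) = "H" then (c.1 + 1, c.2) else c
          if pvCell gl (outer + inner) = "B" then (c.1, c.2 + 1) else c)
        ((0 : Int), (0 : Int))
      (acc.1 ++ [c.1], acc.2 ++ [c.2]))
    ([], [])

-- current_template_const = [row highs, row bases, column highs, column bases]
def tmplA (gl : List (Int × String)) (n m : Int) : List (List Int) :=
  let rows := aRows gl n m
  let cols := aCols gl n m
  [rows.1, rows.2, cols.1, cols.2]

-- A's inner constraint loop ('for const in range(len(...))', early return False)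
def aCheckInner (ci ti : List Int) : List Int → Bool
  | [] => true
  | j :: js =>
    if PySem.List.pyGetD ci j 0 ≠ -1 ∧ PySem.List.pyGetD ci j 0 ≠ PySem.List.pyGetD ti j 0
    then false
    else aCheckInner ci ti js

-- A's outer constraint loop ('for sub_lists in range(len(list_of_const))')
def aCheckOuter (consts tmpl : List (List Int)) : List Int → Bool
  | [] => true
  | i :: is =>
    aCheckInner (PySem.List.pyGetD consts i []) (PySem.List.pyGetD tmpl i [])
        (PySem.List.pyRange 0 ((PySem.List.pyGetD consts i []).length : Int) 1)
      && aCheckOuter consts tmpl is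

def it_fits_the_constraints (game_list : List (Int × String)) (row_num : Int) (col_num : Int) (list_of_const : List (List Int)) : Bool :=
  aCheckOuter list_of_const (tmplA game_list row_num col_num)
    (PySem.List.pyRange 0 (list_of_const.length : Int) 1)

-- ===== PORT B =====
-- Source B's line_count(start, step, length, marker)
def bLineCount (gl : List (Int × String)) (start step len : Int) (marker : String) : Int :=
  (PySem.List.pyRange 0 len 1).foldl
    (fun c k => if pvCell gl (start + k * step) = marker then c + 1 else c) 0

-- Source B's inner loop over 'for j in range(len(list_of_const[i]))'
def bInner (gl : List (Int × String)) (n m i : Int) (ci : List Int) : List Int → Bool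
  | [] => true
  | j :: js =>
    let v := PySem.List.pyGetD ci j 0
    if v = -1 then bInner gl n m i ci js
    else
      let actual :=
        if i < 2 then bLineCount gl (j * m) 1 m (if i = 0 then "H" else "B")
        else bLineCount gl j m n (if i = 2 then "H" else "B")
      if v ≠ actual then false else bInner gl n m i ci js

-- Source B's outer loop over 'for i in range(len(list_of_const))'
def bOuter (gl : List (Int × String)) (n m : Int) (lc : List (List Int)) : List Int → Bool
  | [] => true
  | i :: is =>
    bInner gl n m i (PySem.List.pyGetD lc i [])
        (PySem.List.pyRange 0 ((PySem.List.pyGetD lc i []).length : Int) 1)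
      && bOuter gl n m lc is

def it_fits_the_constraints_alt (game_list : List (Int × String)) (row_num : Int) (col_num : Int) (list_of_const : List (List Int)) : Bool :=
  bOuter game_list row_num col_num list_of_const
    (PySem.List.pyRange 0 (list_of_const.length : Int) 1)

-- ===== PRECONDITION & SPEC =====
-- counts of marker s in row j / column j of the grid (input-level, used only to state Pre_)
def pvRowCount (gl : List (Int × String)) (m j : Int) (s : String) : Int :=
  (PySem.List.pyRange 0 m 1).foldl
    (fun c k => if (PySem.List.pyGetD gl (j * m + k) ((0 : Int), "")).2 = s then c + 1 else c) 0

def pvColCount (gl : List (Int × String)) (n m j : Int) (s : String) : Int :=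
  (PySem.List.pyRange 0 n 1).foldl
    (fun c k => if (PySem.List.pyGetD gl (j + k * m) ((0 : Int), "")).2 = s then c + 1 else c) 0

-- constraint entry (i, j) is checked, in shape, and fails (A returns False at it)
def pvFailB (gl : List (Int × String)) (n m : Int) (lc : List (List Int)) (i j : Nat) : Bool :=
  ((lc.getD i []).getD j 0 != -1) && (decide (i < 4))
    && (decide ((j : Int) < if i < 2 then n else m))
    && ((lc.getD i []).getD j 0
          != (if i < 2 then pvRowCount gl m (j : Int) (if i = 0 then "H" else "B")
              else pvColCount gl n m (j : Int) (if i = 2 then "H" else "B")))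

-- constraint entry (i, j) is checked but lies outside the 4 × (row/col) template shape
-- (A raises IndexError when it reaches it)
def pvBadB (n m : Int) (lc : List (List Int)) (i j : Nat) : Bool :=
  ((lc.getD i []).getD j 0 != -1)
    && !((decide (i < 4)) && (decide ((j : Int) < if i < 2 then n else m)))

-- Pre_ is exactly 'the Python A raises no exception': col_num ≠ 0 (range step 0 is
-- ValueError), the grid holds row_num*col_num cells when both are positive (else
-- IndexError while counting), and every out-of-shape non -1 constraint entry (IndexError
-- when reached) is preceded, in check order, by a failing in-shape constraint, so A
-- returns False before reaching it.
def Pre_it_fits_the_constraints (game_list : List (Int × String)) (row_num : Int) (col_num : Int) (list_of_const : List (List Int)) : Prop :=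
  col_num ≠ 0 ∧
  (1 ≤ row_num → 1 ≤ col_num → row_num * col_num ≤ (game_list.length : Int)) ∧
  ∀ i ∈ List.range list_of_const.length,
    ∀ j ∈ List.range (list_of_const.getD i []).length,
      pvBadB row_num col_num list_of_const i j = true →
        ∃ i' ∈ List.range list_of_const.length,
          ∃ j' ∈ List.range (list_of_const.getD i' []).length,
            (i' < i ∨ (i' = i ∧ j' < j)) ∧ pvFailB game_list row_num col_num list_of_const i' j' = true
instance (game_list : List (Int × String)) (row_num : Int) (col_num : Int) (list_of_const : List (List Int)) : Decidable (Pre_it_fits_the_constraints game_list row_num col_num list_of_const) := by unfold Pre_it_fits_the_constraints; infer_instance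

def pvWitness_it_fits_the_constraints : (List (Int × String)) × Int × Int × List (List Int) :=
  ([(0, "H")], 1, 1, [[1]])

def Spec_it_fits_the_constraints (game_list : List (Int × String)) (row_num : Int) (col_num : Int) (list_of_const : List (List Int)) (out : Bool) : Prop := out = it_fits_the_constraints_alt game_list row_num col_num list_of_const
instance (game_list : List (Int × String)) (row_num : Int) (col_num : Int) (list_of_const : List (List Int)) (out : Bool) : Decidable (Spec_it_fits_the_constraints game_list row_num col_num list_of_const out) := by unfold Spec_it_fits_the_constraints; infer_instance

-- ===== CLAIM (what is proved, stated in full; the proofs are below) =====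
def Claim_equal_it_fits_the_constraints : Prop := ∀ (game_list : List (Int × String)) (row_num : Int) (col_num : Int) (list_of_const : List (List Int)), Dom_it_fits_the_constraints game_list row_num col_num list_of_const → Pre_it_fits_the_constraints game_list row_num col_num list_of_const → Spec_it_fits_the_constraints game_list row_num col_num list_of_const (it_fits_the_constraints game_list row_num col_num list_of_const)

-- ===== LEMMAS AND PROOFS =====

-- range(0, n*m, m) is the list of row starts (any col_num ≠ 0)

theorem pvRangeStep (n m : Int) (hm : m ≠ 0) :
    PySem.List.pyRange 0 (n * m) m = (List.range n.toNat).map (fun k : Nat => m * (k : Int)) := by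
  rcases lt_or_gt_of_ne hm with hneg | hpos
  · simp only [PySem.List.pyRange, if_neg hm, if_neg (by omega : ¬ (0:Int) < m)]
    have hcount : (if n * m < 0 then ((0 - n * m + -m - 1) / -m).toNat else 0) = n.toNat := by
      by_cases h : n * m < 0
      · have hn : 1 ≤ n := by nlinarith
        have : 0 - n * m + -m - 1 = (-m - 1) + n * (-m) := by ring
        rw [if_pos h, this, Int.add_mul_ediv_right _ _ (by omega : -m ≠ 0),
          Int.ediv_eq_zero_of_lt (by omega) (by omega)]
        simp
      · have : n ≤ 0 := by nlinarith
        rw [if_neg h]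
        omega
    rw [hcount]
    simp only [zero_add]
  · rw [PySem.List.pyRange_of_pos 0 (n*m) hpos]
    have hcount : (if (0:Int) < n * m then ((n * m - 0 + m - 1) / m).toNat else 0) = n.toNat := by
      by_cases h : (0:Int) < n * m
      · have hn : 1 ≤ n := by nlinarith
        have : n * m - 0 + m - 1 = (m - 1) + n * m := by ring
        rw [if_pos h, this, Int.add_mul_ediv_right _ _ (by omega : m ≠ 0),
          Int.ediv_eq_zero_of_lt (by omega) (by omega)]
        simp
      · have : n ≤ 0 := by nlinarith
        rw [if_neg h]
        omega
    rw [hcount]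
    simp only [zero_add]

theorem pvRangeOne (n : Int) :
    PySem.List.pyRange 0 n 1 = (List.range n.toNat).map (fun k : Nat => (k : Int)) := by
  by_cases h : 0 ≤ n
  · have := PySem.List.pyRange_zero_natCast n.toNat
    rwa [Int.toNat_of_nonneg h] at this
  · rw [PySem.List.pyRange_one_eq_nil (by omega)]
    have : n.toNat = 0 := by omega
    simp [this]

-- proof-side count functions (the values A's tables and B's line_count both compute)
def rowCnt (gl : List (Int × String)) (m : Int) (s : String) (r : Nat) : Int :=
  (PySem.List.pyRange 0 m 1).foldl
    (fun c inner => if pvCell gl (m * (r : Int) + inner) = s then c + 1 else c) 0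

def colCnt (gl : List (Int × String)) (n m : Int) (s : String) (c : Nat) : Int :=
  (List.range n.toNat).foldl
    (fun acc (r : Nat) => if pvCell gl ((c : Int) + m * (r : Int)) = s then acc + 1 else acc) 0

def tmplSpec (gl : List (Int × String)) (n m : Int) : List (List Int) :=
  [(List.range n.toNat).map (rowCnt gl m "H"), (List.range n.toNat).map (rowCnt gl m "B"),
   (List.range m.toNat).map (colCnt gl n m "H"), (List.range m.toNat).map (colCnt gl n m "B")]

-- A's two-accumulator counting body is a pair of independent counters
theorem pvPairBody (gl : List (Int × String)) (outer : Int) :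
    (fun (c : Int × Int) inner =>
      let c := if pvCell gl (outer + inner) = "H" then (c.1 + 1, c.2) else c
      if pvCell gl (outer + inner) = "B" then (c.1, c.2 + 1) else c)
    = fun (c : Int × Int) inner =>
        ((if pvCell gl (outer + inner) = "H" then c.1 + 1 else c.1),
         (if pvCell gl (outer + inner) = "B" then c.2 + 1 else c.2)) := by
  funext c inner
  dsimp only []
  split_ifs <;> rfl

theorem aRows_eq (gl : List (Int × String)) (n m : Int) (hm : m ≠ 0) :
    aRows gl n m = ((List.range n.toNat).map (rowCnt gl m "H"),
                    (List.range n.toNat).map (rowCnt gl m "B")) := by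
  unfold aRows
  have h1 : ∀ outer : Int,
      ((PySem.List.pyRange 0 m 1).foldl
        (fun (c : Int × Int) inner =>
          let c := if pvCell gl (outer + inner) = "H" then (c.1 + 1, c.2) else c
          if pvCell gl (outer + inner) = "B" then (c.1, c.2 + 1) else c)
        ((0 : Int), (0 : Int)))
      = ((PySem.List.pyRange 0 m 1).foldl
          (fun c inner => if pvCell gl (outer + inner) = "H" then c + 1 else c) 0,
         (PySem.List.pyRange 0 m 1).foldl
          (fun c inner => if pvCell gl (outer + inner) = "B" then c + 1 else c) 0) := by
    intro outer
    rw [pvPairBody gl outer, PySem.List.foldl_prod_mk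
      (f := fun (a : Int) inner => if pvCell gl (outer + inner) = "H" then a + 1 else a)
      (g := fun (a : Int) inner => if pvCell gl (outer + inner) = "B" then a + 1 else a)]
  simp only [h1]
  rw [PySem.List.foldl_prod_mk
      (f := fun acc outer => acc ++ [(PySem.List.pyRange 0 m 1).foldl
          (fun c inner => if pvCell gl (outer + inner) = "H" then c + 1 else c) 0])
      (g := fun acc outer => acc ++ [(PySem.List.pyRange 0 m 1).foldl
          (fun c inner => if pvCell gl (outer + inner) = "B" then c + 1 else c) 0]),
    PySem.List.foldl_append_singleton_eq_map, PySem.List.foldl_append_singleton_eq_map,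
    pvRangeStep n m hm, List.map_map, List.map_map]
  rfl

theorem aCols_eq (gl : List (Int × String)) (n m : Int) (hm : m ≠ 0) :
    aCols gl n m = ((List.range m.toNat).map (colCnt gl n m "H"),
                    (List.range m.toNat).map (colCnt gl n m "B")) := by
  unfold aCols
  have h1 : ∀ outer : Int,
      ((PySem.List.pyRange 0 (n * m) m).foldl
        (fun (c : Int × Int) inner =>
          let c := if pvCell gl (outer + inner) = "H" then (c.1 + 1, c.2) else c
          if pvCell gl (outer + inner) = "B" then (c.1, c.2 + 1) else c)
        ((0 : Int), (0 : Int)))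
      = ((List.range n.toNat).foldl
          (fun acc (r : Nat) => if pvCell gl (outer + m * (r : Int)) = "H" then acc + 1 else acc) 0,
         (List.range n.toNat).foldl
          (fun acc (r : Nat) => if pvCell gl (outer + m * (r : Int)) = "B" then acc + 1 else acc) 0) := by
    intro outer
    rw [pvPairBody gl outer, PySem.List.foldl_prod_mk
      (f := fun (a : Int) inner => if pvCell gl (outer + inner) = "H" then a + 1 else a)
      (g := fun (a : Int) inner => if pvCell gl (outer + inner) = "B" then a + 1 else a),
      pvRangeStep n m hm, List.foldl_map, List.foldl_map]
  simp only [h1]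
  rw [PySem.List.foldl_prod_mk
      (f := fun acc outer => acc ++ [(List.range n.toNat).foldl
          (fun acc (r : Nat) => if pvCell gl (outer + m * (r : Int)) = "H" then acc + 1 else acc) 0])
      (g := fun acc outer => acc ++ [(List.range n.toNat).foldl
          (fun acc (r : Nat) => if pvCell gl (outer + m * (r : Int)) = "B" then acc + 1 else acc) 0]),
    PySem.List.foldl_append_singleton_eq_map, PySem.List.foldl_append_singleton_eq_map,
    pvRangeOne m, List.map_map, List.map_map]
  rfl

theorem rowCnt_eq_bLineCount (gl : List (Int × String)) (m : Int) (s : String) (r : Nat) :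
    rowCnt gl m s r = bLineCount gl ((r : Int) * m) 1 m s := by
  unfold rowCnt bLineCount
  have hf : (fun (c : Int) inner => if pvCell gl (m * (r : Int) + inner) = s then c + 1 else c)
      = fun (c : Int) k => if pvCell gl ((r : Int) * m + k * 1) = s then c + 1 else c := by
    funext c k
    rw [mul_one, mul_comm m (r : Int)]
  rw [hf]

theorem colCnt_eq_bLineCount (gl : List (Int × String)) (n m : Int) (s : String) (c : Nat) :
    colCnt gl n m s c = bLineCount gl (c : Int) m n s := by
  unfold colCnt bLineCount
  rw [pvRangeOne n, List.foldl_map]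
  have hf : (fun acc (r : Nat) => if pvCell gl ((c : Int) + m * (r : Int)) = s then acc + 1 else acc)
      = fun (acc : Int) (r : Nat) => if pvCell gl ((c : Int) + (r : Int) * m) = s then acc + 1 else acc := by
    funext acc r
    rw [mul_comm m (r : Int)]
  rw [hf]

theorem pvInner_eq (gl : List (Int × String)) (n m : Int) (ci : List Int) (i : Nat)
    (hshape : ∀ j ∈ List.range ci.length, ci.getD j 0 ≠ -1 →
      i < 4 ∧ ((j : Int) < if i < 2 then n else m)) :
    ∀ js : List Int, (∀ j ∈ js, 0 ≤ j ∧ j < (ci.length : Int)) →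
      aCheckInner ci (PySem.List.pyGetD (tmplSpec gl n m) (i : Int) []) js
        = bInner gl n m (i : Int) ci js := by
  intro js
  induction js with
  | nil => intro _; rfl
  | cons j js ih =>
    intro hb
    have hj := hb j (List.mem_cons_self ..)
    have htail : ∀ j ∈ js, 0 ≤ j ∧ j < (ci.length : Int) :=
      fun x hx => hb x (List.mem_cons_of_mem _ hx)
    have hjn : j = ((j.toNat : Nat) : Int) := by omega
    have hv : PySem.List.pyGetD ci j 0 = ci.getD j.toNat 0 := by
      conv_lhs => rw [hjn]
      rw [PySem.List.pyGetD_natCast]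
    by_cases hv1 : PySem.List.pyGetD ci j 0 = -1
    · simp only [aCheckInner, bInner, hv1, ne_eq, not_true_eq_false, false_and, if_false, if_true]
      exact ih htail
    · have hsh := hshape j.toNat (List.mem_range.2 (by omega)) (by rw [← hv]; exact hv1)
      have hi4 : i < 4 := hsh.1
      interval_cases i
      · have hjlt : j.toNat < n.toNat := by have := hsh.2; norm_num at this; omega
        have hT : PySem.List.pyGetD (tmplSpec gl n m) (((0 : Nat) : Nat) : Int) []
            = (List.range n.toNat).map (rowCnt gl m "H") := by
          rw [PySem.List.pyGetD_natCast]; rfl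
        have hE : PySem.List.pyGetD ((List.range n.toNat).map (rowCnt gl m "H")) j 0
            = bLineCount gl (j * m) 1 m "H" := by
          rw [hjn, PySem.List.pyGetD_natCast, PySem.List.getD_map_range _ _ _ _ hjlt,
            rowCnt_eq_bLineCount, ← hjn]
        by_cases hva : PySem.List.pyGetD ci j 0 = bLineCount gl (j * m) 1 m "H" <;>
          · simp only [aCheckInner, bInner, hT, hE]
            norm_num [hv1, hva]
            first | exact ih htail | skip
      · have hjlt : j.toNat < n.toNat := by have := hsh.2; norm_num at this; omega
        have hT : PySem.List.pyGetD (tmplSpec gl n m) (((1 : Nat) : Nat) : Int) []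
            = (List.range n.toNat).map (rowCnt gl m "B") := by
          rw [PySem.List.pyGetD_natCast]; rfl
        have hE : PySem.List.pyGetD ((List.range n.toNat).map (rowCnt gl m "B")) j 0
            = bLineCount gl (j * m) 1 m "B" := by
          rw [hjn, PySem.List.pyGetD_natCast, PySem.List.getD_map_range _ _ _ _ hjlt,
            rowCnt_eq_bLineCount, ← hjn]
        by_cases hva : PySem.List.pyGetD ci j 0 = bLineCount gl (j * m) 1 m "B" <;>
          · simp only [aCheckInner, bInner, hT, hE]
            norm_num [hv1, hva]
            first | exact ih htail | skip
      · have hjlt : j.toNat < m.toNat := by have := hsh.2; norm_num at this; omega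
        have hT : PySem.List.pyGetD (tmplSpec gl n m) (((2 : Nat) : Nat) : Int) []
            = (List.range m.toNat).map (colCnt gl n m "H") := by
          rw [PySem.List.pyGetD_natCast]; rfl
        have hE : PySem.List.pyGetD ((List.range m.toNat).map (colCnt gl n m "H")) j 0
            = bLineCount gl j m n "H" := by
          rw [hjn, PySem.List.pyGetD_natCast, PySem.List.getD_map_range _ _ _ _ hjlt,
            colCnt_eq_bLineCount, ← hjn]
        by_cases hva : PySem.List.pyGetD ci j 0 = bLineCount gl j m n "H" <;>
          · simp only [aCheckInner, bInner, hT, hE]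
            norm_num [hv1, hva]
            first | exact ih htail | skip
      · have hjlt : j.toNat < m.toNat := by have := hsh.2; norm_num at this; omega
        have hT : PySem.List.pyGetD (tmplSpec gl n m) (((3 : Nat) : Nat) : Int) []
            = (List.range m.toNat).map (colCnt gl n m "B") := by
          rw [PySem.List.pyGetD_natCast]; rfl
        have hE : PySem.List.pyGetD ((List.range m.toNat).map (colCnt gl n m "B")) j 0
            = bLineCount gl j m n "B" := by
          rw [hjn, PySem.List.pyGetD_natCast, PySem.List.getD_map_range _ _ _ _ hjlt,
            colCnt_eq_bLineCount, ← hjn]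
        by_cases hva : PySem.List.pyGetD ci j 0 = bLineCount gl j m n "B" <;>
          · simp only [aCheckInner, bInner, hT, hE]
            norm_num [hv1, hva]
            first | exact ih htail | skip

theorem pvOuter_eq (gl : List (Int × String)) (n m : Int) (lc : List (List Int))
    (hpre : ∀ i ∈ List.range lc.length, ∀ j ∈ List.range (lc.getD i []).length,
      (lc.getD i []).getD j 0 ≠ -1 → i < 4 ∧ ((j : Int) < if i < 2 then n else m)) :
    ∀ is : List Int, (∀ i ∈ is, 0 ≤ i ∧ i < (lc.length : Int)) →
      aCheckOuter lc (tmplSpec gl n m) is = bOuter gl n m lc is := by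
  intro is
  induction is with
  | nil => intro _; rfl
  | cons i is ih =>
    intro hb
    have hi := hb i (List.mem_cons_self ..)
    have hin : i = ((i.toNat : Nat) : Int) := by omega
    have hlc : PySem.List.pyGetD lc i [] = lc.getD i.toNat [] := by
      conv_lhs => rw [hin]
      rw [PySem.List.pyGetD_natCast]
    have hinner := pvInner_eq gl n m (lc.getD i.toNat []) i.toNat
      (hpre i.toNat (List.mem_range.2 (by omega)))
      (PySem.List.pyRange 0 (((lc.getD i.toNat []).length : Nat) : Int) 1)
      (by
        intro j hj
        rw [PySem.List.mem_pyRange_one] at hj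
        exact ⟨hj.1, by exact_mod_cast hj.2⟩)
    simp only [aCheckOuter, bOuter, hlc]
    rw [← hin] at hinner
    rw [hinner, ih (fun x hx => hb x (List.mem_cons_of_mem _ hx))]

-- the short-circuiting check loops are List.all's
theorem aCheckInner_all (ci ti : List Int) : ∀ js : List Int,
    aCheckInner ci ti js = js.all (fun j =>
      !(decide (PySem.List.pyGetD ci j 0 ≠ -1 ∧
        PySem.List.pyGetD ci j 0 ≠ PySem.List.pyGetD ti j 0))) := by
  intro js
  induction js with
  | nil => rfl
  | cons j js ih =>
    by_cases h : PySem.List.pyGetD ci j 0 ≠ -1 ∧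
        PySem.List.pyGetD ci j 0 ≠ PySem.List.pyGetD ti j 0
    · simp [aCheckInner, h]
    · simp only [aCheckInner, if_neg h, ih, List.all_cons]
      have h2 : (!decide (PySem.List.pyGetD ci j 0 ≠ -1 ∧
          PySem.List.pyGetD ci j 0 ≠ PySem.List.pyGetD ti j 0)) = true := by
        simp only [Bool.not_eq_true', decide_eq_false_iff_not]
        exact h
      rw [h2, Bool.true_and]

theorem bInner_all (gl : List (Int × String)) (n m i : Int) (ci : List Int) : ∀ js : List Int,
    bInner gl n m i ci js = js.all (fun j =>
      (decide (PySem.List.pyGetD ci j 0 = -1)) ||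
      (decide (PySem.List.pyGetD ci j 0 =
        (if i < 2 then bLineCount gl (j * m) 1 m (if i = 0 then "H" else "B")
         else bLineCount gl j m n (if i = 2 then "H" else "B"))))) := by
  intro js
  induction js with
  | nil => rfl
  | cons j js ih =>
    by_cases h1 : PySem.List.pyGetD ci j 0 = -1
    · simp [bInner, h1, ih]
    · by_cases h2 : PySem.List.pyGetD ci j 0 =
          (if i < 2 then bLineCount gl (j * m) 1 m (if i = 0 then "H" else "B")
           else bLineCount gl j m n (if i = 2 then "H" else "B")) <;>
        simp [bInner, h1, h2, ih]

theorem aCheckOuter_all (consts tmpl : List (List Int)) : ∀ is : List Int,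
    aCheckOuter consts tmpl is = is.all (fun i =>
      aCheckInner (PySem.List.pyGetD consts i []) (PySem.List.pyGetD tmpl i [])
        (PySem.List.pyRange 0 ((PySem.List.pyGetD consts i []).length : Int) 1)) := by
  intro is
  induction is with
  | nil => rfl
  | cons i is ih => simp [aCheckOuter, ih]

theorem bOuter_all (gl : List (Int × String)) (n m : Int) (lc : List (List Int)) : ∀ is : List Int,
    bOuter gl n m lc is = is.all (fun i =>
      bInner gl n m i (PySem.List.pyGetD lc i [])
        (PySem.List.pyRange 0 ((PySem.List.pyGetD lc i []).length : Int) 1)) := by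
  intro is
  induction is with
  | nil => rfl
  | cons i is ih => simp [bOuter, ih]

-- Pre_'s count expressions are B's line counts
theorem pvRowCount_eq (gl : List (Int × String)) (m j : Int) (s : String) :
    pvRowCount gl m j s = bLineCount gl (j * m) 1 m s := by
  unfold pvRowCount bLineCount pvCell
  have hf : (fun (c : Int) k => if (PySem.List.pyGetD gl (j * m + k) ((0 : Int), "")).2 = s then c + 1 else c)
      = fun (c : Int) k => if (PySem.List.pyGetD gl (j * m + k * 1) ((0 : Int), "")).2 = s then c + 1 else c := by
    funext c k
    rw [mul_one]
  rw [hf]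

theorem pvColCount_eq (gl : List (Int × String)) (n m j : Int) (s : String) :
    pvColCount gl n m j s = bLineCount gl j m n s := rfl

-- the value A's template holds at an in-shape entry (i, j) is B's on-demand count
theorem pvEntry_eq (gl : List (Int × String)) (n m : Int) (i j : Nat)
    (hi4 : i < 4) (hjb : (j : Int) < if i < 2 then n else m) :
    PySem.List.pyGetD (PySem.List.pyGetD (tmplSpec gl n m) ((i : Nat) : Int) []) ((j : Nat) : Int) 0
      = (if i < 2 then bLineCount gl (((j : Nat) : Int) * m) 1 m (if i = 0 then "H" else "B")
         else bLineCount gl ((j : Nat) : Int) m n (if i = 2 then "H" else "B")) := by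
  interval_cases i
  · have hjlt : j < n.toNat := by norm_num at hjb; omega
    rw [PySem.List.pyGetD_natCast, PySem.List.pyGetD_natCast]
    show ((List.range n.toNat).map (rowCnt gl m "H")).getD j 0 = _
    rw [PySem.List.getD_map_range _ _ _ _ hjlt, rowCnt_eq_bLineCount]
    norm_num
  · have hjlt : j < n.toNat := by norm_num at hjb; omega
    rw [PySem.List.pyGetD_natCast, PySem.List.pyGetD_natCast]
    show ((List.range n.toNat).map (rowCnt gl m "B")).getD j 0 = _
    rw [PySem.List.getD_map_range _ _ _ _ hjlt, rowCnt_eq_bLineCount]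
    norm_num
  · have hjlt : j < m.toNat := by norm_num at hjb; omega
    rw [PySem.List.pyGetD_natCast, PySem.List.pyGetD_natCast]
    show ((List.range m.toNat).map (colCnt gl n m "H")).getD j 0 = _
    rw [PySem.List.getD_map_range _ _ _ _ hjlt, colCnt_eq_bLineCount]
    norm_num
  · have hjlt : j < m.toNat := by norm_num at hjb; omega
    rw [PySem.List.pyGetD_natCast, PySem.List.pyGetD_natCast]
    show ((List.range m.toNat).map (colCnt gl n m "B")).getD j 0 = _
    rw [PySem.List.getD_map_range _ _ _ _ hjlt, colCnt_eq_bLineCount]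
    norm_num

-- a failing in-shape constraint makes both ports return false
theorem pvFail_both_false (gl : List (Int × String)) (n m : Int) (lc : List (List Int))
    (iF jF : Nat) (hiL : iF < lc.length) (hjL : jF < (lc.getD iF []).length)
    (hf : pvFailB gl n m lc iF jF = true) :
    aCheckOuter lc (tmplSpec gl n m) (PySem.List.pyRange 0 (lc.length : Int) 1) = false ∧
    bOuter gl n m lc (PySem.List.pyRange 0 (lc.length : Int) 1) = false := by
  unfold pvFailB at hf
  simp only [Bool.and_eq_true, bne_iff_ne, decide_eq_true_eq] at hf
  obtain ⟨⟨⟨hv, hi4⟩, hjb⟩, hne⟩ := hf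
  have hAct := pvEntry_eq gl n m iF jF hi4 hjb
  have hCnt : (if iF < 2 then pvRowCount gl m (jF : Int) (if iF = 0 then "H" else "B")
        else pvColCount gl n m (jF : Int) (if iF = 2 then "H" else "B"))
      = (if iF < 2 then bLineCount gl ((jF : Int) * m) 1 m (if iF = 0 then "H" else "B")
         else bLineCount gl ((jF : Int)) m n (if iF = 2 then "H" else "B")) := by
    by_cases h2 : iF < 2 <;> simp [h2, pvRowCount_eq, pvColCount_eq]
  rw [hCnt] at hne
  have hlc : PySem.List.pyGetD lc ((iF : Nat) : Int) [] = lc.getD iF [] :=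
    PySem.List.pyGetD_natCast _ _ _
  have hci : PySem.List.pyGetD (lc.getD iF []) ((jF : Nat) : Int) 0 = (lc.getD iF []).getD jF 0 :=
    PySem.List.pyGetD_natCast _ _ _
  have hmemI : ((iF : Nat) : Int) ∈ PySem.List.pyRange 0 (lc.length : Int) 1 := by
    rw [PySem.List.mem_pyRange_one]
    constructor
    · positivity
    · exact_mod_cast hiL
  have hmemJ : ((jF : Nat) : Int) ∈ PySem.List.pyRange 0 ((lc.getD iF []).length : Int) 1 := by
    rw [PySem.List.mem_pyRange_one]
    constructor
    · positivity
    · exact_mod_cast hjL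
  -- the Int-valued branch condition B evaluates at (iF, jF)
  have hiInt2 : ((iF : Nat) : Int) < 2 ↔ iF < 2 := by exact_mod_cast Iff.rfl
  constructor
  · rw [aCheckOuter_all]
    apply List.all_eq_false.mpr
    refine ⟨((iF : Nat) : Int), hmemI, ?_⟩
    rw [hlc, aCheckInner_all]
    simp only [Bool.not_eq_true]
    apply List.all_eq_false.mpr
    refine ⟨((jF : Nat) : Int), hmemJ, ?_⟩
    simp only [hci, hAct, Bool.not_eq_true', Bool.not_eq_false, decide_eq_true_eq]
    exact ⟨hv, hne⟩
  · rw [bOuter_all]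
    apply List.all_eq_false.mpr
    refine ⟨((iF : Nat) : Int), hmemI, ?_⟩
    rw [hlc, bInner_all]
    rw [Bool.not_eq_true]
    apply List.all_eq_false.mpr
    refine ⟨((jF : Nat) : Int), hmemJ, ?_⟩
    simp only [hci, Bool.or_eq_true, decide_eq_true_eq, not_or]
    refine ⟨hv, ?_⟩
    intro hEq
    apply hne
    rw [hEq]
    by_cases h2 : iF < 2
    · rw [if_pos h2, if_pos (by exact_mod_cast h2)]
      congr 1
      by_cases h0 : iF = 0
      · rw [if_pos h0, if_pos (by exact_mod_cast h0)]
      · rw [if_neg h0, if_neg (by exact_mod_cast h0)]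
    · rw [if_neg h2, if_neg (by exact_mod_cast h2)]
      congr 1
      by_cases h0 : iF = 2
      · rw [if_pos h0, if_pos (by exact_mod_cast h0)]
      · rw [if_neg h0, if_neg (by exact_mod_cast h0)]

-- ===== VERDICT (by name: the statement is the Claim_ definition above) =====
theorem it_fits_the_constraints_spec : Claim_equal_it_fits_the_constraints := by
  intro gl n m lc _hdom hpre
  unfold Pre_it_fits_the_constraints at hpre
  obtain ⟨hm, -, hchk⟩ := hpre
  unfold Spec_it_fits_the_constraints it_fits_the_constraints it_fits_the_constraints_alt
  have ht : tmplA gl n m = tmplSpec gl n m := by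
    unfold tmplA tmplSpec
    rw [aRows_eq gl n m hm, aCols_eq gl n m hm]
  rw [ht]
  by_cases hfail : ∃ i ∈ List.range lc.length, ∃ j ∈ List.range (lc.getD i []).length,
      pvFailB gl n m lc i j = true
  · obtain ⟨iF, hiF, jF, hjF, hf⟩ := hfail
    rw [List.mem_range] at hiF hjF
    obtain ⟨hA, hB⟩ := pvFail_both_false gl n m lc iF jF hiF hjF hf
    rw [hA, hB]
  · -- no failing in-shape constraint; then Pre_ forbids any out-of-shape entry,
    -- and both sides check the same values everywhere
    have hshape : ∀ i ∈ List.range lc.length, ∀ j ∈ List.range (lc.getD i []).length,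
        (lc.getD i []).getD j 0 ≠ -1 → i < 4 ∧ ((j : Int) < if i < 2 then n else m) := by
      intro i hi j hj hv
      by_contra hcon
      have hbad : pvBadB n m lc i j = true := by
        unfold pvBadB
        simp only [Bool.and_eq_true, bne_iff_ne, Bool.not_eq_true', Bool.and_eq_false_iff,
          decide_eq_false_iff_not]
        exact ⟨hv, not_and_or.mp hcon⟩
      obtain ⟨i', hi', j', hj', -, hf⟩ := hchk i hi j hj hbad
      exact hfail ⟨i', hi', j', hj', hf⟩
    exact pvOuter_eq gl n m lc hshape _ (by
      intro i hi
      rw [PySem.List.mem_pyRange_one] at hi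
      exact ⟨hi.1, hi.2⟩)
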